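-- pv_equiv track=rewrite | github.com/gyyxs88/short_novel_write | tools/story_idea_pack_builder.py | unique_sorted_raw_values
-- ===== SOURCE A (Python) =====
-- def unique_sorted_raw_values(values: list[str], field_name: str) -> list[str]:
--     if not isinstance(values, list) or not values:
--         raise ValueError(f"{field_name} 必须是非空字符串数组。")
--     normalized_values: set[str] = set()
--     for value in values:
--         if not isinstance(value, str) or not value.strip():
--             raise ValueError(f"{field_name} 里的每一项都必须是非空字符串。")
--         normalized_values.add(value.strip())
--     return sorted(normalized_values)
-- ===== SOURCE B (Python) =====
-- def unique_sorted_raw_values(values: list[str], field_name: str) -> list[str]: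
--     if not isinstance(values, list) or not values:
--         raise ValueError(f"{field_name} 必须是非空字符串数组。")
--     stripped: list[str] = []
--     for value in values:
--         if not isinstance(value, str) or not value.strip():
--             raise ValueError(f"{field_name} 里的每一项都必须是非空字符串。")
--         stripped.append(value.strip())
--     stripped.sort()
--     result: list[str] = []
--     for v in stripped:
--         if not result or result[-1] != v:
--             result.append(v)
--     return result
-- ===== Notes on version B (the rewrite author's own statement) =====
-- stated objective: alternative
-- what changed: B maintains no set: it collects the stripped values into a list, sorts it, and removes duplicates in one adjacent-comparison pass over the sorted list, instead of A's hash-set accumulation followed by sorted().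
import Mathlib
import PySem

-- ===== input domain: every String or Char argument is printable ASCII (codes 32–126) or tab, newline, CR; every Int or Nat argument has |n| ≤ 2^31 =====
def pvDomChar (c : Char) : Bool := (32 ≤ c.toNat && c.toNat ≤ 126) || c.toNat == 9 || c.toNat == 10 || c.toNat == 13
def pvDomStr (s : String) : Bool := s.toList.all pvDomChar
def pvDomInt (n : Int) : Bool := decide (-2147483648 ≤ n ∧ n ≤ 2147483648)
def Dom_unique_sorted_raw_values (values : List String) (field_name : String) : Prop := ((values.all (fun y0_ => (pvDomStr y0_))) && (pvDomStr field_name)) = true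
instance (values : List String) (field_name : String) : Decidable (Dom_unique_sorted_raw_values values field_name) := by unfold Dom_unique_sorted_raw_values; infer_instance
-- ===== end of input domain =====

-- B replaces A's hash-set accumulation + sorted() by: collect stripped values, sort, then
-- one adjacent-comparison pass removing duplicates (alternative algorithm, same cost).


-- ===== PORT A =====
-- validation raises are excluded by Pre_; on admitted inputs A builds a set of stripped
-- values and returns sorted(set).
def unique_sorted_raw_values (values : List String) (field_name : String) : List String :=
  let normalized_values : PySem.Set String :=
    values.foldl (fun s value => PySem.Set.add s (PySem.Str.strip value)) PySem.Set.empty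
  PySem.List.sorted normalized_values (fun x => x) false

-- ===== PORT B =====
-- validation raises are excluded by Pre_; on admitted inputs B collects value.strip() into
-- a list, sorts it, and appends each element only when it differs from the last appended.
def unique_sorted_raw_values_alt (values : List String) (field_name : String) : List String :=
  let stripped := values.map (fun value => PySem.Str.strip value)
  let stripped := PySem.List.sorted stripped (fun x => x) false
  stripped.foldl (fun result v => if result = [] ∨ result.getLast? ≠ some v then result ++ [v] else result) []

-- ===== PRECONDITION & SPEC =====
-- Pre_ excludes exactly the inputs on which Python A raises ValueError: an empty list, or a
-- list containing a whitespace-only (or empty) string.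
def Pre_unique_sorted_raw_values (values : List String) (field_name : String) : Prop :=
  values ≠ [] ∧ ∀ v ∈ values, PySem.Str.strip v ≠ ""
instance (values : List String) (field_name : String) : Decidable (Pre_unique_sorted_raw_values values field_name) := by unfold Pre_unique_sorted_raw_values; infer_instance
def pvWitness_unique_sorted_raw_values : List String × String := ([" b ", "a", "b"], "field")
def Spec_unique_sorted_raw_values (values : List String) (field_name : String) (out : List String) : Prop := out = unique_sorted_raw_values_alt values field_name
instance (values : List String) (field_name : String) (out : List String) : Decidable (Spec_unique_sorted_raw_values values field_name out) := by unfold Spec_unique_sorted_raw_values; infer_instance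

-- ===== CLAIM (what is proved, stated in full; the proofs are below) =====
def Claim_equal_unique_sorted_raw_values : Prop := ∀ (values : List String) (field_name : String), Dom_unique_sorted_raw_values values field_name → Pre_unique_sorted_raw_values values field_name → Spec_unique_sorted_raw_values values field_name (unique_sorted_raw_values values field_name)

-- ===== LEMMAS AND PROOFS =====

-- proof-side recursive description of B's dedup fold: pvGo prev l keeps the elements of l,
-- dropping each one equal to the previously kept element
def pvGo (prev : String) : List String → List String
  | [] => []
  | x :: xs => if x = prev then pvGo prev xs else x :: pvGo x xs

lemma pvGo_nil (prev : String) : pvGo prev [] = [] := rfl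

lemma pvGo_cons_self (prev : String) (xs : List String) : pvGo prev (prev :: xs) = pvGo prev xs := by
  simp [pvGo]

lemma pvGo_cons_ne (prev x : String) (xs : List String) (h : x ≠ prev) :
    pvGo prev (x :: xs) = x :: pvGo x xs := by
  simp [pvGo, h]

lemma pvFoldl_eq_go (l : List String) : ∀ (acc : List String) (prev : String),
    l.foldl (fun result v => if result = [] ∨ result.getLast? ≠ some v then result ++ [v] else result) (acc ++ [prev])
      = acc ++ prev :: pvGo prev l := by
  induction l with
  | nil => intro acc prev; simp [pvGo_nil]
  | cons x xs ih =>
    intro acc prev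
    rw [List.foldl_cons]
    by_cases hx : x = prev
    · rw [hx, pvGo_cons_self]
      have hc : ¬(acc ++ [prev] = [] ∨ (acc ++ [prev]).getLast? ≠ some prev) := by
        simp
      rw [if_neg hc]
      exact ih acc prev
    · rw [pvGo_cons_ne prev x xs hx]
      have hc : (acc ++ [prev] = [] ∨ (acc ++ [prev]).getLast? ≠ some x) := by
        refine Or.inr ?_
        rw [List.getLast?_concat]
        simpa using fun e : prev = x => hx e.symm
      rw [if_pos hc]
      have h2 := ih (acc ++ [prev]) x
      rw [List.append_assoc] at h2
      simpa using h2

lemma pvMem_go (l : List String) : ∀ (prev a : String),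
    a ∈ prev :: pvGo prev l ↔ a ∈ prev :: l := by
  induction l with
  | nil => intro prev a; rw [pvGo_nil]
  | cons x xs ih =>
    intro prev a
    by_cases hx : x = prev
    · rw [hx, pvGo_cons_self, ih prev a]
      simp
    · rw [pvGo_cons_ne prev x xs hx]
      have h1 := ih x a
      simp only [List.mem_cons] at h1 ⊢
      tauto

lemma pvGo_pairwise (l : List String) : ∀ (prev : String),
    (prev :: l).Pairwise (· ≤ ·) → (prev :: pvGo prev l).Pairwise (· < ·) := by
  induction l with
  | nil => intro prev _; rw [pvGo_nil]; simp
  | cons x xs ih =>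
    intro prev h
    rcases List.pairwise_cons.mp h with ⟨hle, htail⟩
    by_cases hx : x = prev
    · rw [hx, pvGo_cons_self]
      refine ih prev (List.pairwise_cons.mpr ⟨?_, (List.pairwise_cons.mp htail).2⟩)
      intro a ha
      rw [hx] at htail
      exact hle a (List.mem_cons_of_mem _ ha)
    · rw [pvGo_cons_ne prev x xs hx]
      have hrest : (x :: pvGo x xs).Pairwise (· < ·) := ih x htail
      refine List.pairwise_cons.mpr ⟨?_, hrest⟩
      intro a ha
      have hpx : prev < x :=
        lt_of_le_of_ne (hle x List.mem_cons_self) (fun e => hx e.symm)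
      rcases List.mem_cons.mp ha with rfl | ha'
      · exact hpx
      · exact lt_trans hpx ((List.pairwise_cons.mp hrest).1 a ha')

-- sorted(set(l)) equals the adjacent-dedup of sorted(l)
lemma pvKey (l : List String) :
    PySem.List.sorted (PySem.Set.ofList l) (fun x => x) false
      = (PySem.List.sorted l (fun x => x) false).foldl
          (fun result v => if result = [] ∨ result.getLast? ≠ some v then result ++ [v] else result) [] := by
  cases hsort : PySem.List.sorted l (fun x => x) false with
  | nil =>
    have hl : l = [] := (PySem.List.sorted_eq_nil_iff l _ false).mp hsort
    subst hl
    exact (PySem.List.sorted_eq_nil_iff _ _ false).mpr rfl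
  | cons m t =>
    have hfold : (m :: t).foldl (fun result v => if result = [] ∨ result.getLast? ≠ some v then result ++ [v] else result) []
        = m :: pvGo m t := by
      rw [List.foldl_cons, if_pos (Or.inl rfl)]
      have h2 := pvFoldl_eq_go t [] m
      simpa using h2
    rw [hfold]
    have hpw : (m :: t).Pairwise (fun a b => a ≤ b) := by
      have h3 := PySem.List.sorted_pairwise l (fun x => x)
      rw [hsort] at h3
      exact h3
    have hlt : (m :: pvGo m t).Pairwise (· < ·) := pvGo_pairwise t m hpw
    have hmem : ∀ a, a ∈ m :: pvGo m t ↔ a ∈ PySem.Set.ofList l := by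
      intro a
      rw [pvMem_go, PySem.Set.mem_ofList, ← PySem.List.mem_sorted l (fun x => x) false, hsort]
    have hperm : (m :: pvGo m t).Perm (PySem.Set.ofList l) := by
      refine (List.perm_ext_iff_of_nodup ?_ (PySem.Set.nodup_ofList l)).mpr hmem
      exact hlt.imp ne_of_lt
    exact PySem.List.sorted_eq_of_perm_of_pairwise_lt (PySem.Set.ofList l) (m :: pvGo m t) (fun x => x) hperm hlt

theorem pvMain (values : List String) (field_name : String) :
    unique_sorted_raw_values values field_name = unique_sorted_raw_values_alt values field_name := by
  show PySem.List.sorted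
      (values.foldl (fun s value => PySem.Set.add s (PySem.Str.strip value)) PySem.Set.empty) (fun x => x) false
    = (PySem.List.sorted (values.map (fun value => PySem.Str.strip value)) (fun x => x) false).foldl
        (fun result v => if result = [] ∨ result.getLast? ≠ some v then result ++ [v] else result) []
  have hset : values.foldl (fun s value => PySem.Set.add s (PySem.Str.strip value)) PySem.Set.empty
      = PySem.Set.ofList (values.map (fun value => PySem.Str.strip value)) := by
    rw [← PySem.Set.update_map_eq_foldl_add]
    rfl
  rw [hset]
  exact pvKey (values.map (fun value => PySem.Str.strip value))

-- ===== VERDICT (by name: the statement is the Claim_ definition above) =====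
theorem unique_sorted_raw_values_spec : Claim_equal_unique_sorted_raw_values := by
  intro values field_name _ _
  exact pvMain values field_name
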